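-- pv_equiv track=rewrite | github.com/shekhar1luitel/quizHub | services/api/app/services/bulk_import_service.py | _resolve_correct_index
-- ===== SOURCE A (Python) =====
-- from typing import Any, Dict, Iterable, List, Sequence, Tuple
--
-- def _resolve_correct_index(option_pairs: List[Tuple[str, str]], correct_value: str | None) -> int | None:
--     if correct_value is None:
--         return None
--     normalized = correct_value.lower()
--     for idx, (header, text) in enumerate(option_pairs):
--         header_key = header.replace("option", "").strip()
--         candidates = {
--             text.lower(),
--             header.lower(),
--             header_key.lower(),
--             str(idx + 1),
--         }
--         if idx < 26:
--             candidates.add(chr(ord("a") + idx))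
--         if normalized in candidates:
--             return idx
--     return None
-- ===== SOURCE B (Python) =====
-- from typing import List, Tuple
--
-- def _resolve_correct_index(option_pairs: List[Tuple[str, str]], correct_value: str | None) -> int | None:
--     if correct_value is None:
--         return None
--     norm = correct_value.lower()
--     # positional references (option number "1".."n" or letter 'a'..'z') match at most one index
--     pos = next((i for i in range(len(option_pairs))
--                 if norm == str(i + 1) or (i < 26 and norm == chr(ord("a") + i))), None)
--     # content references: option text, full header, or the header with "option" stripped
--     data = next((i for i, (h, t) in enumerate(option_pairs)
--                  if norm in (t.lower(), h.lower(), h.replace("option", "").strip().lower())), None)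
--     if data is None:
--         return pos
--     if pos is None:
--         return data
--     return min(data, pos)
-- ===== Notes on version B (the rewrite author's own statement) =====
-- stated objective: alternative
-- what changed: Replaces A's single early-exit scan over per-index candidate sets by two independent searches - one for positional references (number/letter) and one for content references (text/header/stripped header) - combined by taking the earlier hit via min.
import Mathlib
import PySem

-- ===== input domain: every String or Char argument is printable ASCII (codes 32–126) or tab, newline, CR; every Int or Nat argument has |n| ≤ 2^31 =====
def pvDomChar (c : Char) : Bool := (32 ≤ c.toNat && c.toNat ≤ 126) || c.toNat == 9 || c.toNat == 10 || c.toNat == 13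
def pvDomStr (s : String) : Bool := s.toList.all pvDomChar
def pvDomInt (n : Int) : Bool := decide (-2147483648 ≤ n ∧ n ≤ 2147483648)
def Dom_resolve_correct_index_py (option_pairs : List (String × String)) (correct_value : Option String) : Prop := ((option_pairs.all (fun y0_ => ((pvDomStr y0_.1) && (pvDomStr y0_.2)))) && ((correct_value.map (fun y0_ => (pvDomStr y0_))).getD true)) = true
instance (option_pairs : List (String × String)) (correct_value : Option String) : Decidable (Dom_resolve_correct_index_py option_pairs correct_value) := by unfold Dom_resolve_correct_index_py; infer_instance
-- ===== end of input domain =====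

-- B splits A's single early-exit scan over per-index candidate sets into two independent
-- searches — a positional search (number/letter references) and a content search (text/header) —
-- combined by taking the earlier hit (objective: alternative — same cost, different decomposition).

-- ===== PORT A =====
-- header.replace("option","").strip()
def pvHeaderKey (header : String) : String :=
  PySem.Str.strip (PySem.Str.replace header "option" "")

-- candidates = {text.lower(), header.lower(), header_key.lower(), str(idx+1)} (+ chr(ord('a')+idx) if idx<26)
def pvCandSet (idx : Nat) (header text : String) : PySem.Set String :=
  let base := PySem.Set.ofList
    [PySem.Str.lower text, PySem.Str.lower header, PySem.Str.lower (pvHeaderKey header),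
     PySem.Int.toStr ((idx : Int) + 1)]
  if idx < 26 then PySem.Set.add base (String.ofList [Char.ofNat (97 + idx)]) else base

-- the 'for idx, (header, text) in enumerate(...)' loop with early return
def pvScanA (norm : String) : Nat → List (String × String) → Option Int
  | _, [] => none
  | idx, (header, text) :: rest =>
      if PySem.Set.contains (pvCandSet idx header text) norm then some (idx : Int)
      else pvScanA norm (idx + 1) rest

def resolve_correct_index_py (option_pairs : List (String × String)) (correct_value : Option String) : Option Int :=
  match correct_value with
  | none => none
  | some v => pvScanA (PySem.Str.lower v) 0 option_pairs

-- ===== PORT B =====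
-- next((i for i in range(n) if norm == str(i+1) or (i < 26 and norm == chr(ord('a')+i))), None)
def pvPosSearch (norm : String) : Nat → Nat → Option Int
  | _, 0 => none
  | i, Nat.succ fuel =>
      if norm == PySem.Int.toStr ((i : Int) + 1)
          || (decide (i < 26) && norm == String.ofList [Char.ofNat (97 + i)])
      then some (i : Int)
      else pvPosSearch norm (i + 1) fuel

-- next((i for i, (h, t) in enumerate(...) if norm in (t.lower(), h.lower(), h.replace("option","").strip().lower())), None)
def pvDataSearch (norm : String) : Nat → List (String × String) → Option Int
  | _, [] => none
  | i, (h, t) :: rest =>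
      if [PySem.Str.lower t, PySem.Str.lower h,
          PySem.Str.lower (PySem.Str.strip (PySem.Str.replace h "option" ""))].contains norm
      then some (i : Int)
      else pvDataSearch norm (i + 1) rest

-- the final 'if data is None … if pos is None … min(data, pos)' chain
def pvEarliest : Option Int → Option Int → Option Int
  | none, pos => pos
  | some d, none => some d
  | some d, some p => some (min d p)

def resolve_correct_index_py_alt (option_pairs : List (String × String)) (correct_value : Option String) : Option Int :=
  match correct_value with
  | none => none
  | some v =>
      let norm := PySem.Str.lower v
      pvEarliest (pvDataSearch norm 0 option_pairs) (pvPosSearch norm 0 option_pairs.length)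

-- ===== PRECONDITION & SPEC =====
def Spec_resolve_correct_index_py (option_pairs : List (String × String)) (correct_value : Option String) (out : Option Int) : Prop := out = resolve_correct_index_py_alt option_pairs correct_value
instance (option_pairs : List (String × String)) (correct_value : Option String) (out : Option Int) : Decidable (Spec_resolve_correct_index_py option_pairs correct_value out) := by unfold Spec_resolve_correct_index_py; infer_instance

-- ===== CLAIM (what is proved, stated in full; the proofs are below) =====
def Claim_equal_resolve_correct_index_py : Prop := ∀ (option_pairs : List (String × String)) (correct_value : Option String), Dom_resolve_correct_index_py option_pairs correct_value → Spec_resolve_correct_index_py option_pairs correct_value (resolve_correct_index_py option_pairs correct_value)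

-- ===== LEMMAS AND PROOFS =====

-- membership in A's candidate set = (content match ∨ positional match) at that index
theorem candSet_contains_iff (idx : Nat) (header text norm : String) :
    PySem.Set.contains (pvCandSet idx header text) norm = true ↔
      (norm ∈ [PySem.Str.lower text, PySem.Str.lower header,
               PySem.Str.lower (PySem.Str.strip (PySem.Str.replace header "option" ""))]
        ∨ (norm = PySem.Int.toStr ((idx : Int) + 1)
            ∨ (idx < 26 ∧ norm = String.ofList [Char.ofNat (97 + idx)]))) := by
  unfold pvCandSet pvHeaderKey
  by_cases h : idx < 26 <;>
    simp [h, PySem.Set.contains, PySem.Set.mem_add, PySem.Set.mem_ofList, or_assoc,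
      or_comm, or_left_comm]

-- a hit of the positional search starts no earlier than the search did
theorem posSearch_ge (norm : String) :
    ∀ (fuel i : Nat) (j : Int), pvPosSearch norm i fuel = some j → (i : Int) ≤ j := by
  intro fuel
  induction fuel with
  | zero => intro i j h; simp [pvPosSearch] at h
  | succ m ih =>
    intro i j h
    unfold pvPosSearch at h
    split_ifs at h with hc
    · simp only [Option.some.injEq] at h; omega
    · have := ih (i + 1) j h; omega

-- a hit of the content search starts no earlier than the search did
theorem dataSearch_ge (norm : String) :
    ∀ (l : List (String × String)) (i : Nat) (j : Int),
      pvDataSearch norm i l = some j → (i : Int) ≤ j := by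
  intro l
  induction l with
  | nil => intro i j h; simp [pvDataSearch] at h
  | cons p rest ih =>
    intro i j h
    obtain ⟨hh, tt⟩ := p
    unfold pvDataSearch at h
    split_ifs at h with hc
    · simp only [Option.some.injEq] at h; omega
    · have := ih (i + 1) j h; omega

-- main invariant: A's combined scan is the earlier of B's two searches
theorem scanA_eq_earliest (norm : String) :
    ∀ (l : List (String × String)) (i : Nat),
      pvScanA norm i l = pvEarliest (pvDataSearch norm i l) (pvPosSearch norm i l.length) := by
  intro l
  induction l with
  | nil => intro i; simp [pvScanA, pvDataSearch, pvPosSearch, pvEarliest]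
  | cons p rest ih =>
    intro i
    obtain ⟨header, text⟩ := p
    have hcand := candSet_contains_iff i header text norm
    simp only [pvScanA, pvDataSearch, List.length_cons, pvPosSearch]
    by_cases hdb : ([PySem.Str.lower text, PySem.Str.lower header,
        PySem.Str.lower (PySem.Str.strip (PySem.Str.replace header "option" ""))].contains norm) = true
    · have hd : norm ∈ [PySem.Str.lower text, PySem.Str.lower header,
          PySem.Str.lower (PySem.Str.strip (PySem.Str.replace header "option" ""))] := by
        simpa [List.contains_eq_mem] using hdb
      have hc : PySem.Set.contains (pvCandSet i header text) norm = true := hcand.mpr (Or.inl hd)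
      by_cases hpb : (norm == PySem.Int.toStr ((i : Int) + 1)
          || (decide (i < 26) && norm == String.ofList [Char.ofNat (97 + i)])) = true
      · -- both a content and a positional match at i
        rw [if_pos hc, if_pos hdb, if_pos hpb]
        simp [pvEarliest]
      · -- only a content match at i
        rw [if_pos hc, if_pos hdb, if_neg hpb]
        rcases hps : pvPosSearch norm (i + 1) rest.length with _ | j
        · simp [pvEarliest]
        · have hj := posSearch_ge norm rest.length (i + 1) j hps
          simp only [pvEarliest, Option.some.injEq]
          omega
    · by_cases hpb : (norm == PySem.Int.toStr ((i : Int) + 1)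
          || (decide (i < 26) && norm == String.ofList [Char.ofNat (97 + i)])) = true
      · -- only a positional match at i
        have hp : norm = PySem.Int.toStr ((i : Int) + 1)
            ∨ (i < 26 ∧ norm = String.ofList [Char.ofNat (97 + i)]) := by
          simpa using hpb
        have hc : PySem.Set.contains (pvCandSet i header text) norm = true := hcand.mpr (Or.inr hp)
        rw [if_pos hc, if_neg hdb, if_pos hpb]
        rcases hds : pvDataSearch norm (i + 1) rest with _ | j
        · simp [pvEarliest]
        · have hj := dataSearch_ge norm rest (i + 1) j hds
          simp only [pvEarliest, Option.some.injEq]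
          omega
      · -- no match at i: both sides move on
        have hcn : ¬ PySem.Set.contains (pvCandSet i header text) norm = true := by
          intro hh
          rcases hcand.mp hh with h1 | h2
          · exact hdb (by simpa [List.contains_eq_mem] using h1)
          · exact hpb (by simpa using h2)
        rw [if_neg hcn, if_neg hdb, if_neg hpb]
        exact ih (i + 1)

-- ===== VERDICT (by name: the statement is the Claim_ definition above) =====
theorem resolve_correct_index_py_spec : Claim_equal_resolve_correct_index_py := by
  intro option_pairs correct_value _
  unfold Spec_resolve_correct_index_py resolve_correct_index_py resolve_correct_index_py_alt
  cases correct_value with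
  | none => rfl
  | some v => exact scanA_eq_earliest (PySem.Str.lower v) option_pairs 0
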